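-- pv_equiv track=rewrite | github.com/ZhiyuSun/leetcode-practice | 1001-/1417_重新格式化字符串.py | reformat
-- ===== SOURCE A (Python) =====
-- def reformat(s: str) -> str:
--     arr1, arr2 = [], []
--     for i in s:
--         if i.isalpha():
--             arr1.append(i)
--         else:
--             arr2.append(i)
--
--     if abs(len(arr1)-len(arr2)) > 1:
--         return ''
--
--     if len(arr1) < len(arr2):
--         arr1, arr2 = arr2, arr1
--     res = ''
--     for i in range(len(arr2)):
--         res += arr1[i]
--         res += arr2[i]
--     if len(arr1) > len(arr2):
--         res += arr1[-1]
--     return res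
-- ===== SOURCE B (Python) =====
-- def reformat(s: str) -> str:
--     # Direct slot placement: no partition lists, no interleaving loop.
--     # Count letters, decide which class owns the even slots, then write each
--     # character of s straight into its final position via two stride-2 cursors.
--     nl = sum(c.isalpha() for c in s)
--     nd = len(s) - nl
--     if abs(nl - nd) > 1:
--         return ''
--     res = [''] * len(s)
--     e, o = (0, 1) if nl >= nd else (1, 0)
--     for c in s:
--         if c.isalpha():
--             res[e] = c
--             e += 2
--         else:
--             res[o] = c
--             o += 2
--     return ''.join(res)
-- ===== Notes on version B (the rewrite author's own statement) =====
-- stated objective: alternative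
-- what changed: B drops A's partition-into-two-lists and interleaving index loop entirely: it only counts letters, then in one pass writes each character of s directly into its final slot of a preallocated array using two stride-2 cursors (letters at even positions when they are the majority class, else odd), so there is no swap, no zip/index interleave and no trailing-element special case.
import Mathlib
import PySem

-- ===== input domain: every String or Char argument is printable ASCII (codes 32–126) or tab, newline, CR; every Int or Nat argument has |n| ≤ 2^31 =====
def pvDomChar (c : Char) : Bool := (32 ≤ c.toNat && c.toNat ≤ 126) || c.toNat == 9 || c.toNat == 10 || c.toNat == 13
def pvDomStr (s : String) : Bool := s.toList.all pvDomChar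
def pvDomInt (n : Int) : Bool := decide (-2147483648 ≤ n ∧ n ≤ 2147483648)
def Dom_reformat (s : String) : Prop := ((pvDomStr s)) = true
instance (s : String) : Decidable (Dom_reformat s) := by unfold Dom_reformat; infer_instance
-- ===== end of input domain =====

-- B replaces A's partition-and-interleave with a counting pass plus direct slot
-- placement through two stride-2 cursors (alternative decomposition; same behaviour).

-- ===== PORT A =====
def reformat (s : String) : String :=
  let parts := s.toList.foldl
    (fun (p : List Char × List Char) i =>
      if PySem.Chars.isalpha i then (p.1 ++ [i], p.2) else (p.1, p.2 ++ [i]))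
    ([], [])
  let arr1 := parts.1
  let arr2 := parts.2
  if ((arr1.length : Int) - (arr2.length : Int)).natAbs > 1 then "" else
    let pr := if arr1.length < arr2.length then (arr2, arr1) else (arr1, arr2)
    let a1 := pr.1
    let a2 := pr.2
    -- res += a1[i]; res += a2[i]: every index is in range, so pyGetD is exact here
    let res := (PySem.List.pyRange 0 (a2.length : Int) 1).foldl
      (fun r i => r ++ [PySem.List.pyGetD a1 i ' '] ++ [PySem.List.pyGetD a2 i ' ']) ([] : List Char)
    let res := if a1.length > a2.length then res ++ [PySem.List.pyGetD a1 (-1) ' '] else res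
    String.ofList res

-- ===== PORT B =====
-- res = ['']*len(s): the '' filler is modelled by the dummy ' ' — under the guard every
-- slot is overwritten before the join, so the filler is never observable; likewise
-- res[e] = c / res[o] = c is always in range under the guard, so List.set is exact here.
def reformat_alt (s : String) : String :=
  let cs := s.toList
  let nl := cs.countP (fun c => PySem.Chars.isalpha c)      -- sum(c.isalpha() for c in s)
  let nd := cs.length - nl
  if ((nl : Int) - (nd : Int)).natAbs > 1 then "" else
    let eo : Nat × Nat := if nl ≥ nd then (0, 1) else (1, 0)
    let st := cs.foldl
      (fun (st : List Char × Nat × Nat) c =>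
        if PySem.Chars.isalpha c then (st.1.set st.2.1 c, st.2.1 + 2, st.2.2)
        else (st.1.set st.2.2 c, st.2.1, st.2.2 + 2))
      (List.replicate cs.length ' ', eo)
    String.ofList st.1

-- ===== PRECONDITION & SPEC =====
def Spec_reformat (s : String) (out : String) : Prop := out = reformat_alt s
instance (s : String) (out : String) : Decidable (Spec_reformat s out) := by unfold Spec_reformat; infer_instance

-- ===== CLAIM (what is proved, stated in full; the proofs are below) =====
def Claim_equal_reformat : Prop := ∀ (s : String), Dom_reformat s → Spec_reformat s (reformat s)

-- ===== LEMMAS AND PROOFS =====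

-- the common value: position k of the result holds x[k/2] at even k, y[k/2] at odd k
def msel (x y : List Char) (k : Nat) : Char :=
  if k % 2 = 0 then x.getD (k / 2) ' ' else y.getD (k / 2) ' '

def setStride (res : List Char) (s : Nat) (xs : List Char) : List Char :=
  match xs with
  | [] => res
  | x :: t => setStride (res.set s x) (s + 2) t

lemma eq_of_getD (l1 l2 : List Char) (hlen : l1.length = l2.length)
    (h : ∀ k, l1.getD k ' ' = l2.getD k ' ') : l1 = l2 := by
  apply List.ext_getElem hlen
  intro k h1 h2
  have hk := h k
  rwa [List.getD_eq_getElem?_getD, List.getD_eq_getElem?_getD,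
    List.getElem?_eq_getElem h1, List.getElem?_eq_getElem h2, Option.getD_some,
    Option.getD_some] at hk

lemma part_foldl (l acc1 acc2 : List Char) :
    l.foldl (fun (p : List Char × List Char) i =>
        if PySem.Chars.isalpha i then (p.1 ++ [i], p.2) else (p.1, p.2 ++ [i])) (acc1, acc2)
    = (acc1 ++ l.filter (fun c => PySem.Chars.isalpha c),
       acc2 ++ l.filter (fun c => !PySem.Chars.isalpha c)) := by
  induction l generalizing acc1 acc2 with
  | nil => simp
  | cons x xs ih =>
    by_cases h : PySem.Chars.isalpha x <;> simp [h, ih]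

lemma filter_len_add (l : List Char) (p : Char → Bool) :
    (l.filter p).length + (l.filter (fun c => !p c)).length = l.length := by
  induction l with
  | nil => rfl
  | cons x t ih => by_cases h : p x <;> simp [h] <;> omega

lemma zip_eq_map_range {α : Type} (a b : List α) (d : α) (h : b.length ≤ a.length) :
    (List.range b.length).map (fun k => (a.getD k d, b.getD k d)) = a.zip b := by
  apply List.ext_getElem
  · simp; omega
  · intro k h1 h2
    simp at h1
    simp [List.getElem_zip, List.getD_eq_getElem?_getD, h1, Nat.lt_of_lt_of_le h1 h]

-- A's index loop equals the flat interleaving of the zipped pairs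
lemma interleave_eq (a b : List Char) (h : b.length ≤ a.length) :
    (PySem.List.pyRange 0 (b.length : Int) 1).foldl
      (fun r i => r ++ [PySem.List.pyGetD a i ' '] ++ [PySem.List.pyGetD b i ' ']) ([] : List Char)
    = (a.zip b).flatMap (fun p => [p.1, p.2]) := by
  have e1 : (fun (r : List Char) (i : Int) =>
      r ++ [PySem.List.pyGetD a i ' '] ++ [PySem.List.pyGetD b i ' '])
      = fun r i => r ++ [PySem.List.pyGetD a i ' ', PySem.List.pyGetD b i ' '] := by
    funext r i; simp
  rw [e1, PySem.List.foldl_append_eq_flatMap, PySem.List.pyRange_zero_nat]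
  rw [List.flatMap_map, ← zip_eq_map_range a b ' ' h, List.flatMap_map]
  simp [PySem.List.pyGetD_natCast]

lemma pyGetD_neg_one (a : List Char) (n : Nat) (h : a.length = n + 1) :
    PySem.List.pyGetD a (-1) ' ' = a.getD n ' ' := by
  simp [PySem.List.pyGetD, PySem.List.pyGet?, PySem.List.pyIdx?, h,
    List.getD_eq_getElem?_getD]

lemma ilv_getD (a b : List Char) (h : b.length ≤ a.length) (k : Nat) :
    ((a.zip b).flatMap (fun p => [p.1, p.2])).getD k ' '
    = if k < 2 * b.length then msel a b k else ' ' := by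
  induction b generalizing a k with
  | nil => simp [List.getD]
  | cons y t ih =>
    match a with
    | [] => simp at h
    | x :: a' =>
      have h' : t.length ≤ a'.length := by simpa using h
      match k with
      | 0 => simp [msel, List.getD]
      | 1 =>
        simp only [List.zip_cons_cons, List.flatMap_cons, List.cons_append,
          List.nil_append, List.getD_cons_succ, List.getD_cons_zero]
        rw [if_pos (by simp; omega)]
        simp [msel, List.getD]
      | (k + 2) =>
        have hm : msel (x :: a') (y :: t) (k + 2) = msel a' t k := by
          simp only [msel]
          have e2 : (k + 2) % 2 = k % 2 := by omega
          have e3 : (k + 2) / 2 = k / 2 + 1 := by omega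
          rw [e2, e3]
          by_cases hk : k % 2 = 0 <;> simp [hk, List.getD]
        simp only [List.zip_cons_cons, List.flatMap_cons, List.cons_append,
          List.nil_append, List.getD_cons_succ]
        rw [ih a' h' k, hm]
        by_cases hlt : k < 2 * t.length
        · rw [if_pos hlt, if_pos (by simp; omega)]
        · rw [if_neg hlt, if_neg (by simp; omega)]

lemma ilv_length (a b : List Char) (h : b.length ≤ a.length) :
    ((a.zip b).flatMap (fun p => [p.1, p.2])).length = 2 * b.length := by
  simp [List.length_flatMap, List.length_zip]
  omega

-- the value of A's whole result list at index k
lemma aside_getD (a b : List Char) (hle : b.length ≤ a.length) (hle2 : a.length ≤ b.length + 1)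
    (k : Nat) :
    (if a.length > b.length
      then ((a.zip b).flatMap (fun p => [p.1, p.2])) ++ [PySem.List.pyGetD a (-1) ' ']
      else ((a.zip b).flatMap (fun p => [p.1, p.2]))).getD k ' '
    = if k < a.length + b.length then msel a b k else ' ' := by
  have hL := ilv_length a b hle
  by_cases hab : a.length > b.length
  · rw [if_pos hab]
    by_cases hk : k < 2 * b.length
    · rw [List.getD_append _ _ _ _ (by omega), ilv_getD a b hle, if_pos hk, if_pos (by omega)]
    · rw [List.getD_append_right _ _ _ _ (by omega), hL]
      have hv : PySem.List.pyGetD a (-1) ' ' = a.getD b.length ' ' :=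
        pyGetD_neg_one a b.length (by omega)
      by_cases hk2 : k = 2 * b.length
      · subst hk2
        rw [Nat.sub_self, List.getD_cons_zero, hv, if_pos (by omega)]
        have e2 : msel a b (2 * b.length) = a.getD (2 * b.length / 2) ' ' := by
          simp [msel, Nat.mul_mod_right]
        rw [e2, show 2 * b.length / 2 = b.length by omega]
      · rw [if_neg (by omega)]
        have : k - 2 * b.length = (k - 2 * b.length - 1) + 1 := by omega
        rw [this, List.getD_cons_succ]
        simp [List.getD]
  · rw [if_neg hab]
    rw [ilv_getD a b hle, show a.length + b.length = 2 * b.length by omega]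

lemma set_comm_stride (xs : List Char) (s p : Nat) (x : Char) (res : List Char)
    (h : p % 2 ≠ s % 2) :
    setStride (res.set p x) s xs = (setStride res s xs).set p x := by
  induction xs generalizing s res with
  | nil => rfl
  | cons y t ih =>
    simp only [setStride]
    rw [List.set_comm _ _ (show p ≠ s by omega), ih (s + 2) _ (by omega)]

lemma setStride_swap (xs ys res : List Char) (e o : Nat) (h : e % 2 ≠ o % 2) :
    setStride (setStride res e xs) o ys = setStride (setStride res o ys) e xs := by
  induction ys generalizing res o with
  | nil => rfl
  | cons y t ih =>
    simp only [setStride]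
    rw [← set_comm_stride xs e o y res (by omega), ih (res.set o y) (o + 2) (by omega)]

lemma fold_eq_setStride (cs res : List Char) (e o : Nat) (h : e % 2 ≠ o % 2) :
    (cs.foldl
      (fun (st : List Char × Nat × Nat) c =>
        if PySem.Chars.isalpha c then (st.1.set st.2.1 c, st.2.1 + 2, st.2.2)
        else (st.1.set st.2.2 c, st.2.1, st.2.2 + 2))
      (res, e, o)).1
    = setStride (setStride res e (cs.filter (fun c => PySem.Chars.isalpha c))) o
        (cs.filter (fun c => !PySem.Chars.isalpha c)) := by
  induction cs generalizing res e o with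
  | nil => rfl
  | cons c t ih =>
    by_cases hc : PySem.Chars.isalpha c
    · simp only [List.foldl_cons, List.filter_cons, hc, Bool.not_true, Bool.false_eq_true,
        if_true, if_false]
      rw [ih (res.set e c) (e + 2) o (by omega)]
      rfl
    · simp only [List.foldl_cons, List.filter_cons, hc, Bool.not_false, Bool.false_eq_true,
        if_true, if_false]
      rw [ih (res.set o c) e (o + 2) (by omega)]
      simp only [setStride]
      rw [set_comm_stride _ _ _ _ _ (by omega)]

lemma setStride_length (xs res : List Char) (s : Nat) :
    (setStride res s xs).length = res.length := by
  induction xs generalizing s res with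
  | nil => rfl
  | cons x t ih => simp [setStride, ih]

lemma setStride_getD (xs : List Char) (s : Nat) (res : List Char) (k : Nat)
    (hin : s + 2 * xs.length ≤ res.length + 1) :
    (setStride res s xs).getD k ' '
    = if s ≤ k ∧ (k - s) % 2 = 0 ∧ (k - s) / 2 < xs.length then xs.getD ((k - s) / 2) ' '
      else res.getD k ' ' := by
  induction xs generalizing s res with
  | nil => simp [setStride]
  | cons x t ih =>
    simp only [setStride]
    rw [ih (s + 2) (res.set s x) (by simp only [List.length_set, List.length_cons] at *; omega)]
    by_cases h1 : s + 2 ≤ k ∧ (k - (s + 2)) % 2 = 0 ∧ (k - (s + 2)) / 2 < t.length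
    · rw [if_pos h1, if_pos (by simp only [List.length_cons]; omega)]
      rw [show (k - s) / 2 = (k - (s + 2)) / 2 + 1 by omega, List.getD_cons_succ]
    · rw [if_neg h1]
      by_cases hk : k = s
      · subst hk
        rw [if_pos (by simp only [List.length_cons]; omega)]
        rw [show (k - k) / 2 = 0 by omega, List.getD_cons_zero,
          List.getD_eq_getElem?_getD,
          List.getElem?_set_self (by simp only [List.length_cons] at hin; omega),
          Option.getD_some]
      · rw [List.getD_eq_getElem?_getD, List.getElem?_set_ne (fun h => hk h.symm),
          ← List.getD_eq_getElem?_getD]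
        rw [if_neg (by
          intro h2
          simp only [List.length_cons] at h2
          exact h1 ⟨by omega, by omega, by omega⟩)]

-- the value of B's result list at index k
lemma bside_getD (a b : List Char) (n k : Nat) (hle : b.length ≤ a.length)
    (hle2 : a.length ≤ b.length + 1) (hn : n = a.length + b.length) :
    (setStride (setStride (List.replicate n ' ') 0 a) 1 b).getD k ' '
    = if k < n then msel a b k else ' ' := by
  rw [setStride_getD b 1 _ k (by rw [setStride_length, List.length_replicate]; omega)]
  by_cases h1 : 1 ≤ k ∧ (k - 1) % 2 = 0 ∧ (k - 1) / 2 < b.length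
  · rw [if_pos h1, if_pos (by omega)]
    have e2 : msel a b k = b.getD (k / 2) ' ' := by
      simp only [msel]; rw [if_neg (by omega)]
    rw [e2, show k / 2 = (k - 1) / 2 by omega]
  · rw [if_neg h1, setStride_getD a 0 _ k (by rw [List.length_replicate]; omega)]
    by_cases h2 : 0 ≤ k ∧ (k - 0) % 2 = 0 ∧ (k - 0) / 2 < a.length
    · rw [if_pos h2, if_pos (by omega)]
      have e2 : msel a b k = a.getD (k / 2) ' ' := by
        simp only [msel]; rw [if_pos (by omega)]
      rw [e2, show (k - 0) / 2 = k / 2 by omega]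
    · rw [if_neg h2, if_neg (by omega)]
      simp only [List.getD_eq_getElem?_getD, List.getElem?_replicate]
      split <;> rfl

-- A's whole result list equals B's slot-placement list (longer list a, shorter b)
lemma result_eq (a b : List Char) (hle : b.length ≤ a.length) (hle2 : a.length ≤ b.length + 1) :
    (if a.length > b.length
      then ((PySem.List.pyRange 0 (b.length : Int) 1).foldl
        (fun r i => r ++ [PySem.List.pyGetD a i ' '] ++ [PySem.List.pyGetD b i ' ']) ([] : List Char))
        ++ [PySem.List.pyGetD a (-1) ' ']
      else ((PySem.List.pyRange 0 (b.length : Int) 1).foldl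
        (fun r i => r ++ [PySem.List.pyGetD a i ' '] ++ [PySem.List.pyGetD b i ' ']) ([] : List Char)))
    = setStride (setStride (List.replicate (a.length + b.length) ' ') 0 a) 1 b := by
  rw [interleave_eq a b hle]
  apply eq_of_getD
  · rw [setStride_length, setStride_length, List.length_replicate]
    by_cases hab : a.length > b.length
    · rw [if_pos hab]; rw [List.length_append, ilv_length a b hle]; simp; omega
    · rw [if_neg hab]; rw [ilv_length a b hle]; omega
  · intro k
    rw [aside_getD a b hle hle2 k, bside_getD a b (a.length + b.length) k hle hle2 rfl]

-- ===== VERDICT (by name: the statement is the Claim_ definition above) =====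
theorem reformat_spec : Claim_equal_reformat := by
  intro s _
  unfold Spec_reformat reformat reformat_alt
  simp only [part_foldl, List.nil_append]
  have hcount : s.toList.countP (fun c => PySem.Chars.isalpha c)
      = (s.toList.filter (fun c => PySem.Chars.isalpha c)).length :=
    List.countP_eq_length_filter
  set L := s.toList.filter (fun c => PySem.Chars.isalpha c) with hLdef
  set O := s.toList.filter (fun c => !PySem.Chars.isalpha c) with hOdef
  have hsum : L.length + O.length = s.toList.length :=
    filter_len_add s.toList (fun c => PySem.Chars.isalpha c)
  simp only [hcount, show s.toList.length - L.length = O.length by omega]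
  by_cases hg : ((L.length : Int) - (O.length : Int)).natAbs > 1
  · simp only [hg, if_pos]
  · simp only [hg, if_neg, not_false_iff]
    by_cases hge : L.length ≥ O.length
    · rw [if_neg (show ¬ L.length < O.length by omega), if_pos hge]
      rw [fold_eq_setStride s.toList _ 0 1 (by omega), ← hLdef, ← hOdef]
      apply congrArg
      rw [show s.toList.length = L.length + O.length from hsum.symm]
      exact result_eq L O (by omega) (by omega)
    · rw [if_pos (show L.length < O.length by omega), if_neg hge]
      rw [fold_eq_setStride s.toList _ 1 0 (by omega), ← hLdef, ← hOdef]
      apply congrArg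
      rw [setStride_swap L O _ 1 0 (by omega),
        show s.toList.length = O.length + L.length by omega]
      exact result_eq O L (by omega) (by omega)
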